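-- pv_equiv track=rewrite | github.com/lkpAgent/hr-agent | backend/app/services/enhanced_document_service.py | _split_by_semantic_points
-- ===== SOURCE A (Python) =====
-- from typing import List, Optional, Dict, Any, BinaryIO
--
-- def _split_by_semantic_points(text: str, split_points: List[str]) -> List[str]:
--     """根据语义分割点切分文本"""
--     chunks = []
--     current_pos = 0
--
--     # 按顺序查找每个分割点并切分文本
--     for point in split_points:
--         pos = text.find(point, current_pos)
--         if pos != -1:
--             # 添加当前位置到分割点位置的文本块
--             if pos > current_pos:
--                 chunk = text[current_pos:pos].strip()
--                 if chunk:
--                     chunks.append(chunk)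
--             current_pos = pos
--
--     # 添加最后一个文本块
--     if current_pos < len(text):
--         chunk = text[current_pos:].strip()
--         if chunk:
--             chunks.append(chunk)
--
--     return chunks
-- ===== SOURCE B (Python) =====
-- from typing import List
--
-- def _split_by_semantic_points(text: str, split_points: List[str]) -> List[str]:
--     # Phase 1: discover boundary positions.
--     boundaries = [0]
--     for point in split_points:
--         pos = text.find(point, boundaries[-1])
--         if pos != -1:
--             boundaries.append(pos)
--     boundaries.append(len(text))
--     # Phase 2: extract the chunk between each pair of consecutive boundaries.
--     chunks = []
--     for a, b in zip(boundaries, boundaries[1:]):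
--         chunk = text[a:b].strip()
--         if chunk:
--             chunks.append(chunk)
--     return chunks
-- ===== Notes on version B (the rewrite author's own statement) =====
-- stated objective: alternative
-- what changed: A's single fused loop that finds each split point and emits chunks as it goes is replaced by two separate passes: phase 1 collects the ordered boundary positions (0, each found split point, len(text)); phase 2 slices the text at each consecutive boundary pair, strips it and keeps the nonempty chunks.
import Mathlib
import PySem

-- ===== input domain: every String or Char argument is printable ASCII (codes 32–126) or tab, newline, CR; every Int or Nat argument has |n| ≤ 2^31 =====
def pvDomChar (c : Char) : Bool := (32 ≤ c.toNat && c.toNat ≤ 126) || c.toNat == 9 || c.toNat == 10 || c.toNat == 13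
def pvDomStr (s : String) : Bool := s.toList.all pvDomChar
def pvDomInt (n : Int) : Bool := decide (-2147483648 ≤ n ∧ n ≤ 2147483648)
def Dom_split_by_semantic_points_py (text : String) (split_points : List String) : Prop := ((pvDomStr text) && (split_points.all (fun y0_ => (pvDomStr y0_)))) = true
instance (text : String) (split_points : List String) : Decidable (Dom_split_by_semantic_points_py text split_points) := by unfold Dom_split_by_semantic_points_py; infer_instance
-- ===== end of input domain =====

-- B replaces A's single fused loop by two passes — boundary discovery, then chunk
-- extraction over consecutive boundary pairs (objective: alternative decomposition).

-- ===== PORT A =====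
-- the for-loop of A: state (chunks, current_pos), one step per split point
def pvALoop (text : String) : List String → List String → Int → List String × Int
  | [], chunks, cur => (chunks, cur)
  | point :: ps, chunks, cur =>
    let pos := PySem.Str.findFrom text point cur
    if pos != -1 then
      let chunks' :=
        if pos > cur then
          let chunk := PySem.Str.strip (PySem.Str.slice text (some cur) (some pos))
          if chunk != "" then chunks ++ [chunk] else chunks
        else chunks
      pvALoop text ps chunks' pos
    else
      pvALoop text ps chunks cur

def split_by_semantic_points_py (text : String) (split_points : List String) : List String :=
  let r := pvALoop text split_points [] 0
  let chunks := r.1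
  let cur := r.2
  if cur < PySem.Str.len text then
    let chunk := PySem.Str.strip (PySem.Str.slice text (some cur) none)
    if chunk != "" then chunks ++ [chunk] else chunks
  else chunks

-- ===== PORT B =====
-- phase 1 of B: the boundary positions appended after the initial 0 (cur = boundaries[-1])
def pvBBounds (text : String) : List String → Int → List Int
  | [], _ => []
  | point :: ps, cur =>
    let pos := PySem.Str.findFrom text point cur
    if pos != -1 then pos :: pvBBounds text ps pos else pvBBounds text ps cur

-- phase 2 of B: text[a:b].strip() for each consecutive pair (a, b), kept if nonempty
def pvBExtract (text : String) : List Int → List String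
  | a :: b :: rest =>
    let chunk := PySem.Str.strip (PySem.Str.slice text (some a) (some b))
    (if chunk != "" then [chunk] else []) ++ pvBExtract text (b :: rest)
  | _ => []

def split_by_semantic_points_py_alt (text : String) (split_points : List String) : List String :=
  pvBExtract text ((0 :: pvBBounds text split_points 0) ++ [PySem.Str.len text])

-- ===== PRECONDITION & SPEC =====
def Spec_split_by_semantic_points_py (text : String) (split_points : List String) (out : List String) : Prop := out = split_by_semantic_points_py_alt text split_points
instance (text : String) (split_points : List String) (out : List String) : Decidable (Spec_split_by_semantic_points_py text split_points out) := by unfold Spec_split_by_semantic_points_py; infer_instance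

-- ===== CLAIM (what is proved, stated in full; the proofs are below) =====
def Claim_equal_split_by_semantic_points_py : Prop := ∀ (text : String) (split_points : List String), Dom_split_by_semantic_points_py text split_points → Spec_split_by_semantic_points_py text split_points (split_by_semantic_points_py text split_points)

-- ===== LEMMAS AND PROOFS =====

-- the trailing-chunk computation of A, as a function of the final current_pos (proof helper)
def pvFinal (text : String) (cur : Int) : List String :=
  if cur < PySem.Str.len text then
    let chunk := PySem.Str.strip (PySem.Str.slice text (some cur) none)
    if chunk != "" then [chunk] else []
  else []

lemma pvA_eq (text : String) (pts : List String) :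
    split_by_semantic_points_py text pts
      = (pvALoop text pts [] 0).1 ++ pvFinal text (pvALoop text pts [] 0).2 := by
  simp only [split_by_semantic_points_py, pvFinal]
  by_cases h : (pvALoop text pts [] 0).2 < PySem.Str.len text
  · rw [if_pos h, if_pos h]
    split_ifs <;> simp
  · rw [if_neg h, if_neg h]
    simp

lemma pvStrip_empty_of_le (text : String) (a b : Int) (h0 : 0 ≤ b) (h : b ≤ a) :
    PySem.Str.strip (PySem.Str.slice text (some a) (some b)) = "" := by
  apply String.ext
  rw [PySem.Str.toList_strip, PySem.Str.toList_slice, PySem.Chars.slice_eq_listSlice]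
  rw [PySem.List.slice_toNat _ (le_trans h0 h) h0]
  have hz : b.toNat - a.toNat = 0 := by omega
  simp [hz, PySem.Chars.strip, PySem.Chars.lstrip, PySem.Chars.rstrip]

lemma pvSlice_to_len (text : String) (c : Nat) :
    PySem.Str.slice text (some (c : Int)) (some (PySem.Str.len text))
      = PySem.Str.slice text (some (c : Int)) none := by
  apply String.ext
  rw [PySem.Str.toList_slice, PySem.Str.toList_slice]
  simp only [PySem.Chars.slice_eq_listSlice, PySem.Str.len_eq,
    PySem.List.slice_natCast, PySem.List.slice_from_natCast]
  exact List.take_of_length_le (by simp)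

lemma pvFinal_eq_pair (text : String) (c : Nat) (hc : c ≤ text.toList.length) :
    pvFinal text (c : Int) = pvBExtract text [(c : Int), PySem.Str.len text] := by
  have hsing : pvBExtract text [PySem.Str.len text] = [] := by
    simp [pvBExtract]
  have hcons : pvBExtract text [(c : Int), PySem.Str.len text]
      = (if (PySem.Str.strip (PySem.Str.slice text (some (c : Int)) (some (PySem.Str.len text))) != "") = true
         then [PySem.Str.strip (PySem.Str.slice text (some (c : Int)) (some (PySem.Str.len text)))] else [])
        ++ pvBExtract text [PySem.Str.len text] := rfl
  rw [hcons, hsing, List.append_nil, pvSlice_to_len]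
  unfold pvFinal
  by_cases h : (c : Int) < PySem.Str.len text
  · rw [if_pos h]
  · have hce : c = text.toList.length := by
      rw [PySem.Str.len_eq] at h; omega
    have hempty : PySem.Str.strip (PySem.Str.slice text (some (c : Int)) none) = "" := by
      apply String.ext
      rw [PySem.Str.toList_strip, PySem.Str.toList_slice, PySem.Chars.slice_eq_listSlice]
      rw [PySem.List.slice_from_natCast, hce, List.drop_length]
      simp [PySem.Chars.strip, PySem.Chars.lstrip, PySem.Chars.rstrip]
    rw [if_neg h]
    simp [hempty]

lemma pvLoop_extract (text : String) (ps : List String) :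
    ∀ (c : Nat), c ≤ text.toList.length → ∀ chunks : List String,
    (pvALoop text ps chunks (c : Int)).1 ++ pvFinal text (pvALoop text ps chunks (c : Int)).2
      = chunks ++ pvBExtract text (((c : Int) :: pvBBounds text ps (c : Int)) ++ [PySem.Str.len text]) := by
  induction ps with
  | nil =>
    intro c hc chunks
    simp only [pvALoop, pvBBounds, List.nil_append, List.cons_append]
    rw [pvFinal_eq_pair text c hc]
  | cons p ps ih =>
    intro c hc chunks
    by_cases hpos : PySem.Str.findFrom text p (c : Int) = -1
    · simp only [pvALoop, pvBBounds, hpos, bne_self_eq_false, Bool.false_eq_true, if_false]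
      exact ih c hc chunks
    · rw [PySem.Str.findFrom_eq] at hpos
      have hform := PySem.Chars.findFrom_natCast text.toList p.toList c hc
      set f := PySem.Chars.find (List.drop c text.toList) p.toList with hf
      have hfne : f ≠ -1 := by
        intro h0; rw [hform, if_pos (hf ▸ h0)] at hpos; exact hpos rfl
      have hinf : p.toList <:+: List.drop c text.toList := by
        have := (PySem.Chars.find_eq_neg_one_iff (List.drop c text.toList) p.toList)
        rw [← hf] at this
        by_contra hcon
        exact hfne (this.mpr hcon)
      have hf0 : 0 ≤ f := by
        have := (PySem.Chars.find_nonneg_iff (List.drop c text.toList) p.toList).mpr hinf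
        rwa [← hf] at this
      have hfle : f ≤ ((List.drop c text.toList).length : Int) :=
        PySem.Chars.find_le_length _ _
      set e : Nat := c + f.toNat with he
      have hpose : PySem.Chars.findFrom text.toList p.toList (c : Int) = (e : Int) := by
        rw [hform, if_neg (hf ▸ hfne)]; omega
      have hee : e ≤ text.toList.length := by
        simp only [List.length_drop] at hfle; omega
      have hbe : (((e : Int)) != -1) = true := by
        simp only [bne_iff_ne, ne_eq]; omega
      simp only [pvALoop, pvBBounds, PySem.Str.findFrom_eq, hpose, hbe, if_true]
      rw [ih e hee]
      by_cases hlt : (c : Int) < (e : Int)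
      · by_cases hch : PySem.Str.strip (PySem.Str.slice text (some (c : Int)) (some (e : Int))) = ""
        · simp [pvBExtract, hlt, hch]
        · simp [pvBExtract, hlt, hch]
      · have hch : PySem.Str.strip (PySem.Str.slice text (some (c : Int)) (some (e : Int))) = "" := by
          apply pvStrip_empty_of_le <;> omega
        simp [pvBExtract, hlt, hch]

-- ===== VERDICT (by name: the statement is the Claim_ definition above) =====
theorem split_by_semantic_points_py_spec : Claim_equal_split_by_semantic_points_py := by
  intro text pts _
  unfold Spec_split_by_semantic_points_py split_by_semantic_points_py_alt
  rw [pvA_eq]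
  have h := pvLoop_extract text pts 0 (Nat.zero_le _) []
  simpa using h
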